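-- pv_equiv track=rewrite | github.com/felipevzps/weekly-assistant | weekly_assistant/modules/task_processor.py | extract_task_blocks
-- ===== SOURCE A (Python) =====
-- def extract_task_blocks(content):
--     """
--     Extract task blocks (tasks with their subtasks) from content.
--     A task block is a list where the first element is the parent task
--     and subsequent elements are indented subtasks.
--     """
--     task_blocks = []
--     lines = content.splitlines()
--     i = 0
--
--     while i < len(lines):
--         line = lines[i].strip()
--
--         # check if this is a task line
--         if line.startswith('- ['):
--             # start a new task block
--             task_block = [line]
--             i += 1
--
--             # look for subtasks (indented lines)
--             while i < len(lines):
--                 next_line = lines[i].strip()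
--
--                 # if line is indented or starts with a bullet point, it's a subtask
--                 if (lines[i].startswith('    ') or
--                     next_line.startswith('  - ') or
--                     next_line.startswith('    * ')):
--                     task_block.append(lines[i])
--                     i += 1
--                 else:
--                     break
--
--             task_blocks.append(task_block)
--         else:
--             i += 1
--
--     return task_blocks
-- ===== SOURCE B (Python) =====
-- def extract_task_blocks(content):
--     """
--     Extract task blocks (tasks with their subtasks) from content.
--     Single flat pass: 'current' holds the block being built (or None);
--     finished blocks are flushed into task_blocks.
--     """
--     task_blocks = []
--     current = None
--     for raw in content.splitlines():
--         stripped = raw.strip()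
--         if current is not None:
--             if raw.startswith('    '):
--                 current.append(raw)
--                 continue
--             task_blocks.append(current)
--             current = None
--         if stripped.startswith('- ['):
--             current = [stripped]
--     if current is not None:
--         task_blocks.append(current)
--     return task_blocks
-- ===== Notes on version B (the rewrite author's own statement) =====
-- stated objective: simpler
-- what changed: Replaces A's nested index-sharing while loops with a single flat for-loop state machine holding an optional current block that is flushed into the result (A's two stripped-prefix subtask disjuncts are dead since strip() never leaves a leading space, so the subtask test reduces to a 4-space indent check).
import Mathlib
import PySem

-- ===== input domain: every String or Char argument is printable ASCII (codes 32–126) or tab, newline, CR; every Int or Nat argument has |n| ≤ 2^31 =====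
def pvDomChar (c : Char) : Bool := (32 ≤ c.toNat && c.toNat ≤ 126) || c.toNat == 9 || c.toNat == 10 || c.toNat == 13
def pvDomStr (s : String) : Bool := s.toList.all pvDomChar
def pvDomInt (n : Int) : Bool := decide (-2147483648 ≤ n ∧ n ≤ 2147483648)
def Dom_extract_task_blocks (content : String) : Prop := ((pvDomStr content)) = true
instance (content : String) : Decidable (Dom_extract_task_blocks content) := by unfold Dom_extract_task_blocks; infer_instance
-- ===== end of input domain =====

-- B replaces A's nested index-sharing while loops by a single flat fold with an optional
-- current-block accumulator (simpler decomposition; same single pass, same output).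


-- ===== PORT A =====
-- inner 'while i < len(lines)' loop collecting subtasks; returns (task_block, i).
-- fuel only makes the loop total: one unit per iteration, lines.length is always enough.
def innerA (lines : List String) : Nat → Nat → List String → List String × Nat
  | 0, i, block => (block, i)
  | fuel + 1, i, block =>
    if h : i < lines.length then
      let next_line := PySem.Str.strip lines[i]
      if PySem.Str.startswith lines[i] "    " || PySem.Str.startswith next_line "  - " ||
         PySem.Str.startswith next_line "    * " then
        innerA lines fuel (i + 1) (block ++ [lines[i]])
      else (block, i)
    else (block, i)

-- outer 'while i < len(lines)' loop; again one unit of fuel per iteration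
def outerA (lines : List String) : Nat → Nat → List (List String) → List (List String)
  | 0, _, acc => acc
  | fuel + 1, i, acc =>
    if h : i < lines.length then
      let line := PySem.Str.strip lines[i]
      if PySem.Str.startswith line "- [" then
        let r := innerA lines lines.length (i + 1) [line]
        outerA lines fuel r.2 (acc ++ [r.1])
      else
        outerA lines fuel (i + 1) acc
    else acc

def extract_task_blocks (content : String) : List (List String) :=
  outerA (PySem.Str.splitlines content) (PySem.Str.splitlines content).length 0 []

-- ===== PORT B =====
-- one step of the flat loop; state = (finished blocks, current block or none)
def stepB (st : List (List String) × Option (List String)) (raw : String) :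
    List (List String) × Option (List String) :=
  let stripped := PySem.Str.strip raw
  match st with
  | (blocks, some cur) =>
    if PySem.Str.startswith raw "    " then (blocks, some (cur ++ [raw]))
    else if PySem.Str.startswith stripped "- [" then (blocks ++ [cur], some [stripped])
    else (blocks ++ [cur], none)
  | (blocks, none) =>
    if PySem.Str.startswith stripped "- [" then (blocks, some [stripped])
    else (blocks, none)

-- final flush of the current block
def finB : List (List String) × Option (List String) → List (List String)
  | (blocks, some cur) => blocks ++ [cur]
  | (blocks, none) => blocks

def extract_task_blocks_alt (content : String) : List (List String) :=
  finB ((PySem.Str.splitlines content).foldl stepB ([], none))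

-- ===== PRECONDITION & SPEC =====
def Spec_extract_task_blocks (content : String) (out : List (List String)) : Prop := out = extract_task_blocks_alt content
instance (content : String) (out : List (List String)) : Decidable (Spec_extract_task_blocks content out) := by unfold Spec_extract_task_blocks; infer_instance

-- ===== CLAIM (what is proved, stated in full; the proofs are below) =====
def Claim_equal_extract_task_blocks : Prop := ∀ (content : String), Dom_extract_task_blocks content → Spec_extract_task_blocks content (extract_task_blocks content)

-- ===== LEMMAS AND PROOFS =====

-- Python's s.strip() never begins with a space, so A's two stripped-prefix
-- disjuncts ('  - ', '    * ') can never fire.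
theorem strip_head_not_space (l : List Char) (c : Char) (cs : List Char)
    (h : PySem.Chars.strip l = c :: cs) : PySem.Chars.isspace c = false := by
  have hpre : c :: cs <+: PySem.Chars.lstrip l := by
    rw [← h]
    unfold PySem.Chars.strip PySem.Chars.rstrip
    rw [← List.reverse_suffix] at *
    simpa using List.dropWhile_suffix (l := (PySem.Chars.lstrip l).reverse) PySem.Chars.isspace
  obtain ⟨t, ht⟩ := hpre
  have hdw : List.dropWhile PySem.Chars.isspace l = c :: (cs ++ t) := by
    have : PySem.Chars.lstrip l = c :: (cs ++ t) := by simpa using ht.symm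
    simpa [PySem.Chars.lstrip] using this
  have := List.head_dropWhile_not (p := PySem.Chars.isspace) (l := l) (by simp [hdw])
  simp only [hdw, List.head_cons] at this
  simpa using this

theorem dead_prefix (l p : List Char) (hp : p.head? = some ' ') :
    PySem.Chars.startswith (PySem.Chars.strip l) p = false := by
  cases hpl : p with
  | nil => simp [hpl] at hp
  | cons q qs =>
    have hq : q = ' ' := by rw [hpl] at hp; simpa using hp
    cases hl : PySem.Chars.strip l with
    | nil => simp [PySem.Chars.startswith, List.isPrefixOf]
    | cons c cs =>
      have hns := strip_head_not_space _ _ _ hl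
      by_contra hb
      have hb' : PySem.Chars.startswith (c :: cs) (q :: qs) = true := by
        simpa using hb
      have hpre := (PySem.Chars.startswith_iff _ _).mp hb'
      have hqc : q = c := (List.cons_prefix_cons.mp hpre).1
      rw [← hqc, hq] at hns
      exact absurd hns (by decide)

theorem innerA_ge (lines : List String) (fuel i : Nat) (block : List String) :
    i ≤ (innerA lines fuel i block).2 := by
  induction fuel generalizing i block with
  | zero => simp [innerA]
  | succ fuel ih =>
    simp only [innerA]
    split_ifs with h hc
    · exact le_trans (by omega) (ih (i + 1) _)
    · exact le_rfl
    · exact le_rfl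

theorem inner_eq (lines : List String) (fuel i : Nat) (block : List String)
    (hf : lines.length ≤ fuel + i) :
    ∀ acc : List (List String),
    finB ((lines.drop i).foldl stepB (acc, some block)) =
      finB ((lines.drop (innerA lines fuel i block).2).foldl stepB
        (acc ++ [(innerA lines fuel i block).1], none)) := by
  induction fuel generalizing i block with
  | zero =>
    intro acc
    have : lines.drop i = [] := List.drop_eq_nil_of_le (by omega)
    simp [innerA, this, finB]
  | succ fuel ih =>
    intro acc
    by_cases h : i < lines.length
    · rw [List.drop_eq_getElem_cons h]
      simp only [innerA, dif_pos h]
      by_cases hcond : (PySem.Str.startswith lines[i] "    " ||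
          PySem.Str.startswith (PySem.Str.strip lines[i]) "  - " ||
          PySem.Str.startswith (PySem.Str.strip lines[i]) "    * ") = true
      · have h4 : PySem.Str.startswith lines[i] "    " = true := by
          have d1 := dead_prefix lines[i].toList [' ', ' ', '-', ' '] rfl
          have d2 := dead_prefix lines[i].toList [' ', ' ', ' ', ' ', '*', ' '] rfl
          simpa [d1, d2] using hcond
        rw [if_pos hcond]
        simp only [List.foldl_cons, stepB, h4, if_true]
        exact ih (i + 1) (block ++ [lines[i]]) (by omega) acc
      · have h4 : PySem.Str.startswith lines[i] "    " = false := by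
          cases hx : PySem.Str.startswith lines[i] "    " with
          | false => rfl
          | true =>
            have hx' : PySem.Chars.startswith lines[i].toList [' ', ' ', ' ', ' '] = true := by
              simpa using hx
            simp [hx'] at hcond
        rw [if_neg hcond]
        simp only [List.foldl_cons, stepB, h4]
        rw [List.drop_eq_getElem_cons h, List.foldl_cons]
        rfl
    · have hd : lines.drop i = [] := List.drop_eq_nil_of_le (by omega)
      simp [innerA, dif_neg h, hd, finB]

theorem outer_eq (lines : List String) (fuel i : Nat) (acc : List (List String))
    (hf : lines.length ≤ fuel + i) :
    outerA lines fuel i acc = finB ((lines.drop i).foldl stepB (acc, none)) := by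
  induction fuel generalizing i acc with
  | zero =>
    have : lines.drop i = [] := List.drop_eq_nil_of_le (by omega)
    simp [outerA, this, finB]
  | succ fuel ih =>
    by_cases h : i < lines.length
    · rw [List.drop_eq_getElem_cons h]
      simp only [outerA, dif_pos h]
      by_cases hsw : PySem.Str.startswith (PySem.Str.strip lines[i]) "- [" = true
      · rw [if_pos hsw]
        simp only [List.foldl_cons, stepB, hsw, if_true]
        have hge := innerA_ge lines lines.length (i + 1) [PySem.Str.strip lines[i]]
        rw [ih _ _ (by omega)]
        exact (inner_eq lines lines.length (i + 1) [PySem.Str.strip lines[i]]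
          (by omega) acc).symm
      · rw [if_neg hsw]
        have hsw' : PySem.Str.startswith (PySem.Str.strip lines[i]) "- [" = false := by
          cases hx : PySem.Str.startswith (PySem.Str.strip lines[i]) "- [" with
          | false => rfl
          | true => exact absurd hx hsw
        simp only [List.foldl_cons, stepB, hsw', Bool.false_eq_true, if_false]
        exact ih _ _ (by omega)
    · have hd : lines.drop i = [] := List.drop_eq_nil_of_le (by omega)
      simp [outerA, dif_neg h, hd, finB]

-- ===== VERDICT (by name: the statement is the Claim_ definition above) =====
theorem extract_task_blocks_spec : Claim_equal_extract_task_blocks := by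
  intro content _
  unfold Spec_extract_task_blocks extract_task_blocks extract_task_blocks_alt
  simpa using outer_eq (PySem.Str.splitlines content) (PySem.Str.splitlines content).length 0 [] (by omega)
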